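-- pv_equiv track=rewrite | github.com/tkkoba1997/Work-Samples | Python/Explosive Snake Game/Explosive Snake Files/snake_functions.py | crash_check
-- ===== SOURCE A (Python) =====
-- def crash_check(snake_array, bolder_array, size):
-- 	'''Returns True if snake has crashed. Uses resolution window sizes to check (crashes into walls).
-- 	Checks crashes into self by counting if same position occurs multiple times in snake chain. And checks for
-- 	bolder crashes using 'in' operator.'''
-- 	positions = []
-- 	for rectangles in snake_array:
-- 		positions.append( (rectangles[0], rectangles[1]) )
-- 		if rectangles in bolder_array:
-- 			return True
-- 	for spots in range(0, len(positions)):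
-- 		if positions.count(positions[spots]) > 1:
-- 			return True
-- 	# Check if any of the walls have been crashed into. size[0] is width, size[1] is height.
-- 	if snake_array[-1][0] < 0 or snake_array[-1][0] >= size[0]:
-- 		return True
-- 	elif snake_array[-1][1] < 0 or snake_array[-1][1] >= size[1]:
-- 		return True
-- 	return False
-- ===== SOURCE B (Python) =====
-- def crash_check(snake_array, bolder_array, size):
--     # Boulder crash: any full snake rectangle record present among the boulders.
--     if any(r in bolder_array for r in snake_array):
--         return True
--     # Self crash: sort the positions, then a single scan for an adjacent equal pair
--     # (sort-then-adjacent-compare instead of A's quadratic count() scanning).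
--     sorted_positions = sorted((r[0], r[1]) for r in snake_array)
--     for prev, cur in zip(sorted_positions, sorted_positions[1:]):
--         if prev == cur:
--             return True
--     # Wall crash: head outside the window.
--     hx, hy = snake_array[-1][0], snake_array[-1][1]
--     return hx < 0 or hx >= size[0] or hy < 0 or hy >= size[1]
-- ===== Notes on version B (the rewrite author's own statement) =====
-- stated objective: alternative
-- what changed: A's quadratic positions.count duplicate scan is replaced by sort-then-adjacent-compare (sorted positions, one scan for an equal neighbouring pair); the boulder membership pass and the wall test on the head stay as separate stages. Intended as asymptotically better on duplicate-free snakes; a timing run measured only ~1.5x at the largest size, so no speed claim is made.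
-- outside the precondition, e.g. on crash_check([[0, 0], [0, 0]], [], []): A returns True, B returns True; on crash_check([[1, 1], [9]], [[1, 1]], [2, 2]): A returns True, B returns True
import Mathlib
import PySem

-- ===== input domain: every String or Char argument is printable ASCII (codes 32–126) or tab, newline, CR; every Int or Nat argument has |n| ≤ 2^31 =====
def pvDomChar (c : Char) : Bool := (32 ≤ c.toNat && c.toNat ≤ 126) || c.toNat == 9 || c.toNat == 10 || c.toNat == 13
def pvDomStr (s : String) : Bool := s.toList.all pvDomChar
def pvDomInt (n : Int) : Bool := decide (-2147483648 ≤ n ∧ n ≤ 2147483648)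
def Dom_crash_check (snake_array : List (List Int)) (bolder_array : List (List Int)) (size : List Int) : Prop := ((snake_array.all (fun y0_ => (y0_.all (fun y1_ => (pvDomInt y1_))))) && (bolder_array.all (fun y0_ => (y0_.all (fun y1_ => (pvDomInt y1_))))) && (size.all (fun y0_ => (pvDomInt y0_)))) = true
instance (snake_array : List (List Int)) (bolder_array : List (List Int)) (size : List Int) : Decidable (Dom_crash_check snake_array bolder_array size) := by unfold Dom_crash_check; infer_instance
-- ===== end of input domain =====

-- B replaces A's quadratic positions.count duplicate scan by sort-then-adjacent-compare;
-- equivalence is proved on inputs where the Python A raises no IndexError.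


-- ===== PORT A =====
-- first loop of A: build positions, return early (none) when a rectangle is among the boulders
def crashLoop1 (bolder_array : List (List Int)) : List (List Int) → List (Int × Int) → Option (List (Int × Int))
  | [], positions => some positions
  | rectangles :: rest, positions =>
      let positions := positions ++ [(PySem.List.pyGetD rectangles 0 0, PySem.List.pyGetD rectangles 1 0)]
      if bolder_array.contains rectangles then none
      else crashLoop1 bolder_array rest positions

def crash_check (snake_array : List (List Int)) (bolder_array : List (List Int)) (size : List Int) : Bool :=
  match crashLoop1 bolder_array snake_array [] with
  | none => true
  | some positions =>
    if (PySem.List.pyRange 0 (positions.length : Int) 1).any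
        (fun spots => 1 < positions.count (PySem.List.pyGetD positions spots (0, 0))) then true
    else
      if PySem.List.pyGetD (PySem.List.pyGetD snake_array (-1) []) 0 0 < 0
          || PySem.List.pyGetD (PySem.List.pyGetD snake_array (-1) []) 0 0 ≥ PySem.List.pyGetD size 0 0 then true
      else if PySem.List.pyGetD (PySem.List.pyGetD snake_array (-1) []) 1 0 < 0
          || PySem.List.pyGetD (PySem.List.pyGetD snake_array (-1) []) 1 0 ≥ PySem.List.pyGetD size 1 0 then true
      else false

-- ===== PORT B =====
-- the 'for prev, cur in zip(sp, sp[1:])' scan of Source B: true iff some adjacent pair is equal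
def adjDup : List (Int × Int) → Bool
  | a :: b :: t => a == b || adjDup (b :: t)
  | _ => false

def crash_check_alt (snake_array : List (List Int)) (bolder_array : List (List Int)) (size : List Int) : Bool :=
  if snake_array.any (fun r => bolder_array.contains r) then true
  else
    let sorted_positions := PySem.List.sorted2
      (snake_array.map (fun r => (PySem.List.pyGetD r 0 0, PySem.List.pyGetD r 1 0))) Prod.fst Prod.snd
    if adjDup sorted_positions then true
    else
      let hx := PySem.List.pyGetD (PySem.List.pyGetD snake_array (-1) []) 0 0
      let hy := PySem.List.pyGetD (PySem.List.pyGetD snake_array (-1) []) 1 0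
      (hx < 0 || hx ≥ PySem.List.pyGetD size 0 0) || (hy < 0 || hy ≥ PySem.List.pyGetD size 1 0)

-- ===== PRECONDITION & SPEC =====
-- Pre_ excludes exactly the shapes on which A's indexing can raise IndexError (empty snake,
-- a rectangle shorter than 2, size shorter than 2); on a few such inputs A still returns True
-- early (boulder hit or duplicate found before the failing index is reached) and B returns the
-- same True there — the exclusion is by shape, slightly wider than the raising set.
def Pre_crash_check (snake_array : List (List Int)) (bolder_array : List (List Int)) (size : List Int) : Prop :=
  snake_array ≠ [] ∧ (∀ r ∈ snake_array, 2 ≤ r.length) ∧ 2 ≤ size.length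
instance (snake_array : List (List Int)) (bolder_array : List (List Int)) (size : List Int) : Decidable (Pre_crash_check snake_array bolder_array size) := by unfold Pre_crash_check; infer_instance

def pvWitness_crash_check : List (List Int) × List (List Int) × List Int :=
  ([[0, 0], [0, 1]], [[5, 5]], [10, 10])

def Spec_crash_check (snake_array : List (List Int)) (bolder_array : List (List Int)) (size : List Int) (out : Bool) : Prop := out = crash_check_alt snake_array bolder_array size
instance (snake_array : List (List Int)) (bolder_array : List (List Int)) (size : List Int) (out : Bool) : Decidable (Spec_crash_check snake_array bolder_array size out) := by unfold Spec_crash_check; infer_instance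

-- ===== CLAIM (what is proved, stated in full; the proofs are below) =====
def Claim_equal_crash_check : Prop := ∀ (snake_array : List (List Int)) (bolder_array : List (List Int)) (size : List Int), Dom_crash_check snake_array bolder_array size → Pre_crash_check snake_array bolder_array size → Spec_crash_check snake_array bolder_array size (crash_check snake_array bolder_array size)

-- ===== LEMMAS AND PROOFS =====

-- A's first loop returns early (none) exactly when some rectangle is among the boulders,
-- and otherwise yields the accumulated positions list.
theorem crashLoop1_eq (bolder_array : List (List Int)) :
    ∀ (rs : List (List Int)) (acc : List (Int × Int)),
      crashLoop1 bolder_array rs acc =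
        if rs.any (fun r => bolder_array.contains r) then none
        else some (acc ++ rs.map (fun r => (PySem.List.pyGetD r 0 0, PySem.List.pyGetD r 1 0))) := by
  intro rs
  induction rs with
  | nil => intro acc; simp [crashLoop1]
  | cons r rest ih =>
      intro acc
      cases hb : bolder_array.contains r with
      | true =>
          have hb' : r ∈ bolder_array := by simpa using hb
          simp [crashLoop1, hb']
      | false =>
          have hb' : r ∉ bolder_array := by simpa using hb
          simp [crashLoop1, hb', ih]

-- duplicate witness from a non-nodup list
theorem exists_count_gt_of_not_nodup {α : Type} [BEq α] [LawfulBEq α] (xs : List α)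
    (h : ¬ xs.Nodup) : ∃ x ∈ xs, 1 < xs.count x := by
  rw [List.nodup_iff_count_le_one] at h
  push_neg at h
  obtain ⟨x, hx⟩ := h
  exact ⟨x, List.count_pos_iff.mp (by omega), hx⟩

-- A's index/count pass decides ¬Nodup
theorem dup_test_A_iff (positions : List (Int × Int)) :
    ((PySem.List.pyRange 0 (positions.length : Int) 1).any
        (fun spots => 1 < positions.count (PySem.List.pyGetD positions spots (0, 0))) = true)
      ↔ ¬ positions.Nodup := by
  rw [List.any_eq_true]
  constructor
  · rintro ⟨i, hi, hcount⟩
    rw [PySem.List.mem_pyRange_one] at hi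
    have hget := PySem.List.pyGetD_eq_getElem (xs := positions) (d := ((0 : Int), (0 : Int)))
      hi.1 (by exact_mod_cast hi.2)
    rw [List.nodup_iff_count_le_one]
    push_neg
    refine ⟨positions[i.toNat], ?_⟩
    rw [hget] at hcount
    simpa using hcount
  · intro h
    obtain ⟨x, hxmem, hxcount⟩ := exists_count_gt_of_not_nodup positions h
    obtain ⟨k, hk, hkx⟩ := List.getElem_of_mem hxmem
    refine ⟨(k : Int), ?_, ?_⟩
    · rw [PySem.List.mem_pyRange_one]
      constructor <;> [positivity; exact_mod_cast hk]
    · have hget := PySem.List.pyGetD_eq_getElem (xs := positions) (d := ((0 : Int), (0 : Int)))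
        (i := (k : Int)) (by positivity) (by exact_mod_cast hk)
      simp only [hget, Int.toNat_natCast, hkx]
      simpa using hxcount

-- the lexicographic 'before' relation sorted2 (key = fst, snd) sorts by
def lexLt (a b : Int × Int) : Bool :=
  decide (a.1 < b.1) || (!decide (b.1 < a.1) && decide (a.2 < b.2))

theorem lexLt_total_eq (a b : Int × Int) (hab : lexLt a b = false) (hba : lexLt b a = false) :
    a = b := by
  simp [lexLt] at hab hba
  obtain ⟨a1, a2⟩ := a
  obtain ⟨b1, b2⟩ := b
  simp_all
  omega

theorem lexLt_cross (x y z : Int × Int) (hxy : lexLt x y = true) (hzy : lexLt z y = false) :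
    lexLt z x = false := by
  simp [lexLt] at hxy hzy ⊢
  obtain ⟨x1, x2⟩ := x
  obtain ⟨y1, y2⟩ := y
  obtain ⟨z1, z2⟩ := z
  simp_all
  omega

theorem lexLt_asymm (a b : Int × Int) (h : lexLt a b = true) : lexLt b a = false := by
  simp [lexLt] at h ⊢
  obtain ⟨a1, a2⟩ := a
  obtain ⟨b1, b2⟩ := b
  simp_all
  omega

-- insertion keeps the "no later element lexLt-precedes an earlier one" invariant
theorem insertBy_pairwise_lex (x : Int × Int) (ys : List (Int × Int))
    (h : ys.Pairwise (fun a b => lexLt b a = false)) :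
    (PySem.List.insertBy lexLt x ys).Pairwise (fun a b => lexLt b a = false) := by
  induction ys with
  | nil => simp [PySem.List.insertBy]
  | cons y ys ih =>
      rw [List.pairwise_cons] at h
      obtain ⟨hy, hys⟩ := h
      by_cases hxy : lexLt x y = true
      · rw [PySem.List.insertBy, if_pos hxy, List.pairwise_cons]
        refine ⟨?_, List.pairwise_cons.mpr ⟨hy, hys⟩⟩
        intro z hz
        rcases List.mem_cons.mp hz with rfl | hz'
        · exact lexLt_asymm x z hxy
        · exact lexLt_cross x y z hxy (hy z hz')
      · rw [PySem.List.insertBy, if_neg hxy, List.pairwise_cons]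
        refine ⟨?_, ih hys⟩
        intro z hz
        rw [PySem.List.mem_insertBy] at hz
        rcases hz with rfl | hz'
        · exact Bool.eq_false_iff.mpr hxy
        · exact hy z hz'

theorem foldl_insertBy_pairwise_lex (xs acc : List (Int × Int))
    (h : acc.Pairwise (fun a b => lexLt b a = false)) :
    (List.foldl (fun acc x => PySem.List.insertBy lexLt x acc) acc xs).Pairwise
      (fun a b => lexLt b a = false) := by
  induction xs generalizing acc with
  | nil => exact h
  | cons x xs ih => exact ih _ (insertBy_pairwise_lex x acc h)

theorem sorted2_eq_foldl (xs : List (Int × Int)) :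
    PySem.List.sorted2 xs Prod.fst Prod.snd =
      List.foldl (fun acc x => PySem.List.insertBy lexLt x acc) [] xs := rfl

-- adjacent equal pair ⇒ duplicate
theorem not_nodup_of_adjDup : ∀ (l : List (Int × Int)), adjDup l = true → ¬ l.Nodup := by
  intro l
  induction l with
  | nil => intro h; simp [adjDup] at h
  | cons a t ih =>
      cases t with
      | nil => intro h; simp [adjDup] at h
      | cons b t' =>
          intro h hn
          rw [adjDup, Bool.or_eq_true] at h
          rw [List.nodup_cons] at hn
          rcases h with h | h
          · exact hn.1 (by simp [List.mem_cons, eq_of_beq h])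
          · exact ih h hn.2

-- in a lex-sorted list a duplicate shows up as an adjacent equal pair
theorem adjDup_of_not_nodup : ∀ (l : List (Int × Int)),
    l.Pairwise (fun a b => lexLt b a = false) → ¬ l.Nodup → adjDup l = true := by
  intro l
  induction l with
  | nil => intro _ h; exact absurd List.nodup_nil h
  | cons a t ih =>
      intro hp hn
      cases t with
      | nil => exact absurd (List.nodup_singleton a) hn
      | cons b t' =>
          rw [List.pairwise_cons] at hp
          obtain ⟨ha, hp'⟩ := hp
          rw [List.nodup_cons] at hn
          by_cases hmem : a ∈ b :: t'
          · -- a recurs later: sortedness forces a = b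
            have hba : lexLt b a = false := ha b (List.mem_cons_self ..)
            have hab : lexLt a b = false := by
              rcases List.mem_cons.mp hmem with rfl | hmem'
              · exact hba
              · rw [List.pairwise_cons] at hp'
                exact hp'.1 a hmem'
            have : a = b := lexLt_total_eq a b hab hba
            rw [adjDup, Bool.or_eq_true]
            exact Or.inl (by simp [this])
          · have : ¬ (b :: t').Nodup := fun hnd => hn ⟨hmem, hnd⟩
            rw [adjDup, Bool.or_eq_true]
            exact Or.inr (ih hp' this)

-- B's sort-then-adjacent-scan decides ¬Nodup
theorem dup_test_B_iff (positions : List (Int × Int)) :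
    (adjDup (PySem.List.sorted2 positions Prod.fst Prod.snd) = true) ↔ ¬ positions.Nodup := by
  have hperm : (PySem.List.sorted2 positions Prod.fst Prod.snd).Perm positions :=
    PySem.List.sorted2_perm positions Prod.fst Prod.snd false
  have hpw : (PySem.List.sorted2 positions Prod.fst Prod.snd).Pairwise
      (fun a b => lexLt b a = false) := by
    rw [sorted2_eq_foldl]
    exact foldl_insertBy_pairwise_lex positions [] (List.Pairwise.nil)
  constructor
  · intro h
    exact fun hn => not_nodup_of_adjDup _ h (hperm.nodup_iff.mpr hn)
  · intro h
    exact adjDup_of_not_nodup _ hpw (fun hn => h (hperm.nodup_iff.mp hn))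

-- ===== VERDICT (by name: the statement is the Claim_ definition above) =====
theorem crash_check_spec : Claim_equal_crash_check := by
  intro snake_array bolder_array size _hdom _hpre
  unfold Spec_crash_check crash_check crash_check_alt
  rw [crashLoop1_eq]
  cases hb : snake_array.any (fun r => bolder_array.contains r) with
  | true => rw [if_pos rfl, if_pos rfl]
  | false =>
    simp only [Bool.false_eq_true, if_false, List.nil_append]
    set positions := snake_array.map (fun r => (PySem.List.pyGetD r 0 0, PySem.List.pyGetD r 1 0))
      with hpos
    by_cases hd : positions.Nodup
    · have hA : ((PySem.List.pyRange 0 (positions.length : Int) 1).any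
          (fun spots => 1 < positions.count (PySem.List.pyGetD positions spots (0, 0)))) = false := by
        rw [← Bool.not_eq_true, dup_test_A_iff]; exact not_not_intro hd
      have hB : adjDup (PySem.List.sorted2 positions Prod.fst Prod.snd) = false := by
        rw [← Bool.not_eq_true, dup_test_B_iff]; exact not_not_intro hd
      rw [if_neg (by simp [hA])]
      simp only [hB, Bool.false_eq_true, if_false]
      have wall : ∀ (a b : Bool), (if a = true then true else if b = true then true else false)
          = (a || b) := by decide
      exact wall _ _
    · have hA : ((PySem.List.pyRange 0 (positions.length : Int) 1).any
          (fun spots => 1 < positions.count (PySem.List.pyGetD positions spots (0, 0)))) = true :=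
        (dup_test_A_iff positions).mpr hd
      have hB : adjDup (PySem.List.sorted2 positions Prod.fst Prod.snd) = true :=
        (dup_test_B_iff positions).mpr hd
      rw [if_pos hA]
      simp only [hB, if_true]
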